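-- pv_equiv track=rewrite | github.com/bink81/python-tools | src/DetectWordDuplicatesInFiles.py | groupDuplicatedWords
-- ===== SOURCE A (Python) =====
-- def groupDuplicatedWords(wordMap):
-- 	groupedWordMap = {}
-- 	for word in wordMap.keys():
-- 		if wordMap[word] > 1:
-- 			count = wordMap[word]
-- 			if not count in groupedWordMap:
-- 				groupedWordMap[count] = []
-- 			groupedWordMap[count].append(word)
-- 	return groupedWordMap
-- ===== SOURCE B (Python) =====
-- def groupDuplicatedWords(wordMap):
-- 	pairs = [(count, word) for word, count in wordMap.items() if count > 1]
-- 	counts = list(dict.fromkeys(count for count, _ in pairs))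
-- 	return {c: [w for k, w in pairs if k == c] for c in counts}
-- ===== Notes on version B (the rewrite author's own statement) =====
-- stated objective: idiomatic
-- what changed: A bucket-groups in one pass over the dict, mutating per-count lists; B is a comprehension pipeline: filter to (count, word) pairs with count > 1, ordered-dedup the counts with dict.fromkeys, then build each group by one per-count collection pass.
import Mathlib
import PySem

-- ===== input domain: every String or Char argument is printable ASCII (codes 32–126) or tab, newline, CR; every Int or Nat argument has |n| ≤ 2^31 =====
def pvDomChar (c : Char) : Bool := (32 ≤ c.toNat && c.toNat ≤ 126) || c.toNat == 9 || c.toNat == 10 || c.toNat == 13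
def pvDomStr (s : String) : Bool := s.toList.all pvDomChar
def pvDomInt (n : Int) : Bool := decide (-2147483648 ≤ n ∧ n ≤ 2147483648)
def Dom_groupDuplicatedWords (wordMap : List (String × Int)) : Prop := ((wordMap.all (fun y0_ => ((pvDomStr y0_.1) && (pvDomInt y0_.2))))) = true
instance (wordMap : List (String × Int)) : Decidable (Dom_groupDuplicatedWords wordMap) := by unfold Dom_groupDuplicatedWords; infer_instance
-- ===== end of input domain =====

-- B replaces A's single-pass hash bucketing by a comprehension pipeline (filter, ordered
-- dedup of the counts, one per-count collection pass); objective: idiomatic, not faster.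

-- ===== PORT A =====
-- Literal port: the Python dict argument is the association list wordMap; the loop runs
-- over its keys and indexes the dict (first-match lookup; the key is always present, so
-- getD's default 0 is never used).
def groupDuplicatedWords (wordMap : List (String × Int)) : List (Int × List String) :=
  let d : PySem.Dict String Int := PySem.Dict.mk wordMap
  let groupedWordMap : PySem.Dict Int (List String) :=
    d.keys.foldl (fun g word =>
      if d.getD word 0 > 1 then
        let count := d.getD word 0
        let g := if g.contains count = false then g.insert count ([] : List String) else g
        g.modify count [] (fun l => l ++ [word])
      else g) PySem.Dict.empty
  groupedWordMap.items

-- ===== PORT B =====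
def groupDuplicatedWords_alt (wordMap : List (String × Int)) : List (Int × List String) :=
  let pairs := (wordMap.filter (fun p => p.2 > 1)).map (fun p => (p.2, p.1))
  let counts := PySem.List.dedup (pairs.map (fun p => p.1))
  counts.map (fun c => (c, (pairs.filter (fun p => p.1 == c)).map (fun p => p.2)))

-- ===== PRECONDITION & SPEC =====
-- Pre_ excludes association lists with duplicate string keys: a Python dict cannot carry
-- two entries for the same key, so such lists represent no input A ever receives.
def Pre_groupDuplicatedWords (wordMap : List (String × Int)) : Prop :=
  (wordMap.map Prod.fst).Nodup
instance (wordMap : List (String × Int)) : Decidable (Pre_groupDuplicatedWords wordMap) := by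
  unfold Pre_groupDuplicatedWords; infer_instance
def pvWitness_groupDuplicatedWords : (List (String × Int)) :=
  [("aa", 2), ("b", 1), ("c c", 2), ("d", 3)]
def Spec_groupDuplicatedWords (wordMap : List (String × Int)) (out : List (Int × List String)) : Prop := out = groupDuplicatedWords_alt wordMap
instance (wordMap : List (String × Int)) (out : List (Int × List String)) : Decidable (Spec_groupDuplicatedWords wordMap out) := by unfold Spec_groupDuplicatedWords; infer_instance

-- ===== CLAIM (what is proved, stated in full; the proofs are below) =====
def Claim_equal_groupDuplicatedWords : Prop := ∀ (wordMap : List (String × Int)), Dom_groupDuplicatedWords wordMap → Pre_groupDuplicatedWords wordMap → Spec_groupDuplicatedWords wordMap (groupDuplicatedWords wordMap)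

-- ===== LEMMAS AND PROOFS =====

-- Python's "if count not in g: g[count] = []" followed by "g[count].append(word)" is one
-- modify: both append (count, f []) at the end when count is new, and update in place else.
theorem setdefault_modify_collapse (g : PySem.Dict Int (List String)) (c : Int) (w : String) :
    (if g.contains c = false then g.insert c ([] : List String) else g).modify c []
        (fun l => l ++ [w])
      = g.modify c [] (fun l => l ++ [w]) := by
  by_cases hc : g.contains c = false
  · simp only [hc, if_pos]
    unfold PySem.Dict.modify
    rw [PySem.Dict.getD_insert_self, PySem.Dict.insert_insert_self,
        PySem.Dict.getD_of_not_contains g [] hc]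
  · simp [hc]

-- the grouping fold over (count, word) pairs, A's core after normalisation
def groupFold (l : List (Int × String)) : PySem.Dict Int (List String) :=
  l.foldl (fun d p => d.modify p.1 [] (fun v => v ++ [p.2])) PySem.Dict.empty

theorem groupFold_items (l : List (Int × String)) :
    (groupFold l).items
      = (PySem.List.dedup (l.map (fun p => p.1))).map
          (fun c => (c, (l.filter (fun p => p.1 == c)).map (fun p => p.2))) := by
  have hnd : (groupFold l).keys.Nodup :=
    PySem.Dict.nodup_keys_foldl_modify_key l Prod.fst [] (fun _ p v => v ++ [p.2])
      PySem.Dict.empty PySem.Dict.nodup_keys_empty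
  have hkeys : (groupFold l).keys = PySem.List.dedup (l.map (fun p => p.1)) := by
    unfold groupFold
    rw [PySem.Dict.keys_foldl_modify_key l Prod.fst [] (fun _ p v => v ++ [p.2])]
    simp [pysem, PySem.List.dedup, PySem.Set.update_nil_left]
  rw [PySem.Dict.items_eq_map_keys (groupFold l) hnd [], hkeys]
  refine List.map_congr_left (fun c _ => ?_)
  have := PySem.Dict.getD_foldl_modify_append l PySem.Dict.empty c
  unfold groupFold
  simp only [this, PySem.Dict.getD_empty, List.nil_append]

theorem groupDuplicatedWords_eq_core (wordMap : List (String × Int))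
    (hn : (wordMap.map Prod.fst).Nodup) :
    groupDuplicatedWords wordMap
      = (groupFold ((wordMap.filter (fun p => p.2 > 1)).map (fun p => (p.2, p.1)))).items := by
  unfold groupDuplicatedWords
  have hkeys : (PySem.Dict.mk wordMap).keys = wordMap.map Prod.fst := rfl
  simp only [hkeys, List.foldl_map]
  -- replace the dict lookup d.getD p.1 0 by the pair's own value p.2 (keys are Nodup)
  rw [PySem.List.foldl_congr_mem wordMap _
        (fun g p => if p.2 > 1 then g.modify p.2 [] (fun l => l ++ [p.1]) else g)
        PySem.Dict.empty
        (by
          intro acc p hp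
          have hget : (PySem.Dict.mk wordMap).getD p.1 0 = p.2 :=
            PySem.Dict.getD_of_mem_items (PySem.Dict.mk wordMap) hp hn 0
          simp only [hget]
          by_cases h : p.2 > 1
          · simp only [h, if_pos]
            exact setdefault_modify_collapse acc p.2 p.1
          · simp [h])]
  unfold groupFold
  rw [List.foldl_map, List.foldl_filter]
  have hfun : (fun (g : PySem.Dict Int (List String)) (p : String × Int) =>
        if p.2 > 1 then g.modify p.2 [] (fun l => l ++ [p.1]) else g)
      = (fun (g : PySem.Dict Int (List String)) (p : String × Int) =>
        if decide (p.2 > 1) = true then g.modify (p.2, p.1).1 [] (fun v => v ++ [(p.2, p.1).2]) else g) := by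
    funext g p
    by_cases h : p.2 > 1 <;> simp [h]
  rw [hfun]

-- ===== VERDICT (by name: the statement is the Claim_ definition above) =====
theorem groupDuplicatedWords_spec : Claim_equal_groupDuplicatedWords := by
  intro wordMap _ hpre
  unfold Spec_groupDuplicatedWords groupDuplicatedWords_alt
  rw [groupDuplicatedWords_eq_core wordMap hpre, groupFold_items]
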